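-- pv_equiv track=rewrite | github.com/HiThink-Research/GAGE | src/gage_eval/role/adapters/toolchain.py | _matches_prefix
-- ===== SOURCE A (Python) =====
-- from typing import Any, Dict, List, Optional, Sequence
--
-- def _matches_prefix(name: str, prefixes: List[str]) -> bool:
--     for prefix in prefixes:
--         if name == prefix:
--             return True
--         if name.startswith(prefix + "__"):
--             return True
--         if name.startswith(prefix + "_"):
--             return True
--     return False
-- ===== SOURCE B (Python) =====
-- def _matches_prefix(name, prefixes):
--     s = set(prefixes)
--     if name in s:
--         return True
--     for i in range(len(name)):
--         if name[i] == '_' and name[:i] in s: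
--             return True
--     return False
-- ===== Notes on version B (the rewrite author's own statement) =====
-- stated objective: faster
-- what changed: B builds a set of the prefixes once and scans only name's underscore positions, checking name itself and each slice name[:i] before an underscore against the set, instead of A's per-prefix loop with three startswith tests (using that startswith(prefix+'__') is subsumed by startswith(prefix+'_')).
import Mathlib
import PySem

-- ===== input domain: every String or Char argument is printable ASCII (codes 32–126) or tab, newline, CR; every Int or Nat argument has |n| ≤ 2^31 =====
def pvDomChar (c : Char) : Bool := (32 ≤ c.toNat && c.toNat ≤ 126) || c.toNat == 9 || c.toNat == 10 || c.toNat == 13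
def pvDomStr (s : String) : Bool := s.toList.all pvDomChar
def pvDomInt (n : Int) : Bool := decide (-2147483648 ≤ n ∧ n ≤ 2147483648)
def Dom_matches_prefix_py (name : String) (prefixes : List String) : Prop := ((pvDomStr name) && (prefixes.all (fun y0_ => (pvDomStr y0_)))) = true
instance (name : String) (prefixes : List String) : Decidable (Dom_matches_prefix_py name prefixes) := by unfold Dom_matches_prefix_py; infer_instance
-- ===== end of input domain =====

-- B replaces A's per-prefix scan of three startswith tests by one prefix set and a single
-- scan of name's underscore positions (alternative decomposition; equal return value proved below).

-- ===== PORT A =====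
-- the 'for prefix in prefixes' loop with its early returns, step for step
def matchesPrefixGoA (name : String) : List String → Bool
  | [] => false
  | p :: ps =>
    if name == p then true
    else if PySem.Str.startswith name (p ++ "__") then true
    else if PySem.Str.startswith name (p ++ "_") then true
    else matchesPrefixGoA name ps

def matches_prefix_py (name : String) (prefixes : List String) : Bool :=
  matchesPrefixGoA name prefixes

-- ===== PORT B =====
-- Source B: s = set(prefixes); name in s, else scan i in range(len(name)) for name[i] == '_' and name[:i] in s.
-- range(len(name)) is List.range; name[i] for 0 ≤ i < len is name.toList[i]?; name[:i] for 0 ≤ i ≤ len is take i (exact there).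
def matches_prefix_py_alt (name : String) (prefixes : List String) : Bool :=
  let s : PySem.Set String := PySem.Set.ofList prefixes
  if PySem.Set.contains s name then true
  else
    (List.range name.toList.length).any (fun i =>
      name.toList[i]? == some '_' && PySem.Set.contains s (String.ofList (name.toList.take i)))

-- ===== PRECONDITION & SPEC =====
def Spec_matches_prefix_py (name : String) (prefixes : List String) (out : Bool) : Prop := out = matches_prefix_py_alt name prefixes
instance (name : String) (prefixes : List String) (out : Bool) : Decidable (Spec_matches_prefix_py name prefixes out) := by unfold Spec_matches_prefix_py; infer_instance

-- ===== CLAIM (what is proved, stated in full; the proofs are below) =====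
def Claim_equal_matches_prefix_py : Prop := ∀ (name : String) (prefixes : List String), Dom_matches_prefix_py name prefixes → Spec_matches_prefix_py name prefixes (matches_prefix_py name prefixes)

-- ===== LEMMAS AND PROOFS =====

-- A returns true iff some prefix equals name or name starts with prefix ++ "_"
-- (the "__" test is implied by the "_" test).
theorem matchesA_iff (name : String) (ps : List String) :
    matchesPrefixGoA name ps = true ↔
      ∃ p ∈ ps, name = p ∨ (p.toList ++ ['_']) <+: name.toList := by
  induction ps with
  | nil => simp [matchesPrefixGoA]
  | cons p ps ih =>
    simp only [matchesPrefixGoA]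
    split_ifs with h1 h2 h3
    · simp only [true_iff]
      exact ⟨p, List.mem_cons_self, Or.inl (by simpa using h1)⟩
    · have h2' : (p.toList ++ ['_']) <+: name.toList := by
        have := (PySem.Chars.startswith_iff name.toList (p ++ "__").toList).mp
          (by simpa using h2)
        refine List.IsPrefix.trans ?_ (by simpa using this)
        simp
      simp only [true_iff]
      exact ⟨p, List.mem_cons_self, Or.inr h2'⟩
    · have h3' : (p.toList ++ ['_']) <+: name.toList := by
        have := (PySem.Chars.startswith_iff name.toList (p ++ "_").toList).mp
          (by simpa using h3)
        simpa using this
      simp only [true_iff]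
      exact ⟨p, List.mem_cons_self, Or.inr h3'⟩
    · rw [ih]
      constructor
      · rintro ⟨q, hq, hd⟩; exact ⟨q, List.mem_cons_of_mem _ hq, hd⟩
      · rintro ⟨q, hq, hd⟩
        rcases List.mem_cons.mp hq with rfl | hq'
        · rcases hd with hd | hpre
          · exact absurd (by simp [hd]) h1
          · have : PySem.Chars.startswith name.toList (q ++ "_").toList = true :=
              (PySem.Chars.startswith_iff _ _).mpr (by simpa using hpre)
            exact absurd (by simpa using this) h3
        · exact ⟨q, hq', hd⟩

-- B returns true iff name is a prefix itself, or some underscore position i cuts off a prefix.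
theorem matchesB_iff (name : String) (ps : List String) :
    matches_prefix_py_alt name ps = true ↔
      name ∈ ps ∨ ∃ i < name.toList.length,
        name.toList[i]? = some '_' ∧ String.ofList (name.toList.take i) ∈ ps := by
  unfold matches_prefix_py_alt
  simp only []
  split_ifs with h
  · have : name ∈ ps := by
      have := (PySem.Set.contains_iff (PySem.Set.ofList ps) name).mp (by simpa using h)
      simpa [PySem.Set.mem_ofList] using this
    simp [this]
  · have hn : name ∉ ps := by
      intro hmem
      exact h ((PySem.Set.contains_iff _ _).mpr ((PySem.Set.mem_ofList _ _).mpr hmem))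
    simp only [hn, false_or, List.any_eq_true, List.mem_range, Bool.and_eq_true, beq_iff_eq]
    constructor
    · rintro ⟨i, hi, hg, hc⟩
      exact ⟨i, hi, hg, (PySem.Set.mem_ofList _ _).mp ((PySem.Set.contains_iff _ _).mp hc)⟩
    · rintro ⟨i, hi, hg, hc⟩
      exact ⟨i, hi, hg, (PySem.Set.contains_iff _ _).mpr ((PySem.Set.mem_ofList _ _).mpr hc)⟩

-- Bridge: A's characterisation and B's characterisation describe the same inputs.
theorem charac_bridge (name : String) (ps : List String) :
    (∃ p ∈ ps, name = p ∨ (p.toList ++ ['_']) <+: name.toList) ↔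
      (name ∈ ps ∨ ∃ i < name.toList.length,
        name.toList[i]? = some '_' ∧ String.ofList (name.toList.take i) ∈ ps) := by
  constructor
  · rintro ⟨p, hp, hd | hpre⟩
    · exact Or.inl (hd ▸ hp)
    · rcases hpre with ⟨t, ht⟩
      have ht' : p.toList ++ '_' :: t = name.toList := by simpa using ht
      refine Or.inr ⟨p.toList.length, ?_, ?_, ?_⟩
      · have hlen := congrArg List.length ht'
        rw [List.length_append, List.length_cons] at hlen
        omega
      · rw [← ht', List.getElem?_append_right (le_refl _)]
        simp
      · rw [← ht', List.take_left' rfl]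
        simpa using hp
  · rintro (hmem | ⟨i, hi, hget, hmem⟩)
    · exact ⟨name, hmem, Or.inl rfl⟩
    · refine ⟨String.ofList (name.toList.take i), hmem, Or.inr ?_⟩
      have hgetE : name.toList[i] = '_' := by
        simpa [List.getElem?_eq_getElem hi] using hget
      have hdecomp : name.toList = name.toList.take i ++ '_' :: name.toList.drop (i + 1) := by
        conv_lhs => rw [← List.take_append_drop i name.toList]
        rw [List.drop_eq_getElem_cons hi, hgetE]
      refine ⟨name.toList.drop (i + 1), ?_⟩
      conv_rhs => rw [hdecomp]
      simp

-- ===== VERDICT (by name: the statement is the Claim_ definition above) =====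
theorem matches_prefix_py_spec : Claim_equal_matches_prefix_py := by
  intro name prefixes _
  unfold Spec_matches_prefix_py matches_prefix_py
  rw [Bool.eq_iff_iff, matchesA_iff, matchesB_iff]
  exact charac_bridge name prefixes
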